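-- pv_equiv track=rewrite | github.com/Shoopalapa/advent-of-code | day17/day17.py | returnNeighbors
-- ===== SOURCE A (Python) =====
-- def returnNeighbors(x,y,z,boundaryXY,boundaryZ,distance=1,):
-- 	neighbors = []
-- 	for a in range(-distance,distance+1):
-- 		for b in range(-distance,distance+1):
-- 			for c in range(-distance,distance+1):
-- 				diffX = x+a
-- 				diffY = y+b
-- 				diffZ = z+c
-- 				if not (diffX<0 or diffY<0 or diffZ<0 or diffX>boundaryXY or diffY>boundaryXY or diffZ>boundaryZ):
-- 					neighbors.append((x+a,y+b,z+c))
--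
-- 	return(neighbors)
-- ===== SOURCE B (Python) =====
-- def returnNeighbors(x, y, z, boundaryXY, boundaryZ, distance=1):
--     x0 = max(0, x - distance); nx = min(boundaryXY, x + distance) - x0 + 1
--     y0 = max(0, y - distance); ny = min(boundaryXY, y + distance) - y0 + 1
--     z0 = max(0, z - distance); nz = min(boundaryZ, z + distance) - z0 + 1
--     if nx <= 0 or ny <= 0 or nz <= 0:
--         return []
--     out = []
--     for t in range(nx * ny * nz):
--         i = t // (ny * nz)
--         j = (t // nz) % ny
--         k = t % nz
--         out.append((x0 + i, y0 + j, z0 + k))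
--     return out
-- ===== Notes on version B (the rewrite author's own statement) =====
-- stated objective: alternative
-- what changed: B replaces the triple nested offset scan with a per-cell boundary filter by computing the clamped box dimensions first and then running ONE flat loop over a linear index 0..nx*ny*nz-1, decoding each index into (i,j,k) with integer division and modulo.
import Mathlib
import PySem

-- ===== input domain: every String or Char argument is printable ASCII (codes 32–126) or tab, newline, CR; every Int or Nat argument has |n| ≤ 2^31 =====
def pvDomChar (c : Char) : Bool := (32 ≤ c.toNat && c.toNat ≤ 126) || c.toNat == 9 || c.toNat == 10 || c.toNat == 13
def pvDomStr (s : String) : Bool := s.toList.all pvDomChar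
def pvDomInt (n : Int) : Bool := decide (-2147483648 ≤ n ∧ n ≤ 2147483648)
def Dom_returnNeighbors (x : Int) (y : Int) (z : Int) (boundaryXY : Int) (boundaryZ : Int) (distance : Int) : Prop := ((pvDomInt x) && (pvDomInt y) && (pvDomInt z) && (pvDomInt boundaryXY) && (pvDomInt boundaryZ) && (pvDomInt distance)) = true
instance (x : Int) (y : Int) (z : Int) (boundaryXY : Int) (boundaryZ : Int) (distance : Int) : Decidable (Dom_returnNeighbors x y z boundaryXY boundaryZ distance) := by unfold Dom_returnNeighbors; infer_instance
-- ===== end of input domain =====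

-- B computes the clamped box dimensions up front and runs ONE flat loop over a linear index,
-- decoding it with // and % into coordinates, instead of A's triple nested scan with a
-- per-cell boundary filter (objective: alternative algorithm, same results).


-- ===== PORT A =====
def returnNeighbors (x : Int) (y : Int) (z : Int) (boundaryXY : Int) (boundaryZ : Int) (distance : Int) : List (Int × Int × Int) :=
  (PySem.List.pyRange (-distance) (distance + 1) 1).foldl (fun neighbors a =>
    (PySem.List.pyRange (-distance) (distance + 1) 1).foldl (fun neighbors b =>
      (PySem.List.pyRange (-distance) (distance + 1) 1).foldl (fun neighbors c =>
        let diffX := x + a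
        let diffY := y + b
        let diffZ := z + c
        if ¬(diffX < 0 ∨ diffY < 0 ∨ diffZ < 0 ∨ diffX > boundaryXY ∨ diffY > boundaryXY ∨ diffZ > boundaryZ) then
          neighbors ++ [(x + a, y + b, z + c)]
        else neighbors) neighbors) neighbors) []

-- ===== PORT B =====
def returnNeighbors_alt (x : Int) (y : Int) (z : Int) (boundaryXY : Int) (boundaryZ : Int) (distance : Int) : List (Int × Int × Int) :=
  let x0 := max 0 (x - distance)
  let nx := min boundaryXY (x + distance) - x0 + 1
  let y0 := max 0 (y - distance)
  let ny := min boundaryXY (y + distance) - y0 + 1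
  let z0 := max 0 (z - distance)
  let nz := min boundaryZ (z + distance) - z0 + 1
  if nx ≤ 0 ∨ ny ≤ 0 ∨ nz ≤ 0 then []
  else
    (PySem.List.pyRange 0 (nx * ny * nz) 1).foldl (fun out t =>
      let i := PySem.Int.floordiv t (ny * nz)
      let j := PySem.Int.mod (PySem.Int.floordiv t nz) ny
      let k := PySem.Int.mod t nz
      out ++ [(x0 + i, y0 + j, z0 + k)]) []

-- ===== PRECONDITION & SPEC =====
def Spec_returnNeighbors (x : Int) (y : Int) (z : Int) (boundaryXY : Int) (boundaryZ : Int) (distance : Int) (out : List (Int × Int × Int)) : Prop := out = returnNeighbors_alt x y z boundaryXY boundaryZ distance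
instance (x : Int) (y : Int) (z : Int) (boundaryXY : Int) (boundaryZ : Int) (distance : Int) (out : List (Int × Int × Int)) : Decidable (Spec_returnNeighbors x y z boundaryXY boundaryZ distance out) := by unfold Spec_returnNeighbors; infer_instance

-- ===== CLAIM (what is proved, stated in full; the proofs are below) =====
def Claim_equal_returnNeighbors : Prop := ∀ (x : Int) (y : Int) (z : Int) (boundaryXY : Int) (boundaryZ : Int) (distance : Int), Dom_returnNeighbors x y z boundaryXY boundaryZ distance → Spec_returnNeighbors x y z boundaryXY boundaryZ distance (returnNeighbors x y z boundaryXY boundaryZ distance)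

-- ===== LEMMAS AND PROOFS =====

-- The filtered image of a shifted unit-step offset range IS the clamped unit-step range.
lemma shifted_filter_range (c lo hi d : Int) :
    ((PySem.List.pyRange (-d) (d + 1) 1).filter
        (fun t => decide (lo ≤ c + t ∧ c + t ≤ hi))).map (fun t => c + t)
      = PySem.List.pyRange (max lo (c - d)) (min hi (c + d) + 1) 1 := by
  have hplhs : (((PySem.List.pyRange (-d) (d + 1) 1).filter
      (fun t => decide (lo ≤ c + t ∧ c + t ≤ hi))).map (fun t => c + t)).Pairwise (· < ·) :=
    List.Pairwise.map _ (by intro a b h; omega) ((PySem.List.pairwise_lt_pyRange_one _ _).filter _)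
  apply List.Perm.eq_of_pairwise (le := (· < ·))
  · intro a b _ _ h1 h2; omega
  · exact hplhs
  · exact PySem.List.pairwise_lt_pyRange_one _ _
  · rw [List.perm_ext_iff_of_nodup hplhs.nodup (PySem.List.pairwise_lt_pyRange_one _ _).nodup]
    intro t
    simp only [List.mem_map, List.mem_filter, PySem.List.mem_pyRange_one, decide_eq_true_eq]
    constructor
    · rintro ⟨a, ⟨⟨h1, h2⟩, h3, h4⟩, rfl⟩; omega
    · intro h; exact ⟨t - c, ⟨by omega, by omega⟩, by omega⟩

-- flatMap of an if-[]-guard is flatMap over the filtered list.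
lemma flatMap_if_nil {α β : Type} (l : List α) (p : α → Bool) (g : α → List β) :
    l.flatMap (fun t => if p t then g t else []) = (l.filter p).flatMap g := by
  induction l with
  | nil => rfl
  | cons h t ih => by_cases hp : p h <;> simp [List.flatMap_cons, hp, ih]

-- Port A equals the Cartesian product of the three clamped ranges.
lemma A_eq_flatMap (x y z bXY bZ d : Int) :
    returnNeighbors x y z bXY bZ d
      = (PySem.List.pyRange (max 0 (x - d)) (min bXY (x + d) + 1) 1).flatMap (fun i =>
          (PySem.List.pyRange (max 0 (y - d)) (min bXY (y + d) + 1) 1).flatMap (fun j =>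
            (PySem.List.pyRange (max 0 (z - d)) (min bZ (z + d) + 1) 1).map (fun k => (i, j, k)))) := by
  have h0 : returnNeighbors x y z bXY bZ d =
      (PySem.List.pyRange (-d) (d + 1) 1).foldl (fun neighbors a =>
        (PySem.List.pyRange (-d) (d + 1) 1).foldl (fun neighbors b =>
          (PySem.List.pyRange (-d) (d + 1) 1).foldl (fun neighbors c =>
            if ¬(x + a < 0 ∨ y + b < 0 ∨ z + c < 0 ∨ x + a > bXY ∨ y + b > bXY ∨ z + c > bZ) then
              neighbors ++ [(x + a, y + b, z + c)]
            else neighbors) neighbors) neighbors) [] := rfl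
  rw [h0]
  set R := PySem.List.pyRange (-d) (d + 1) 1 with hR
  have hin : ∀ (a b : Int) (acc : List (Int × Int × Int)),
      R.foldl (fun neighbors c =>
        if ¬(x + a < 0 ∨ y + b < 0 ∨ z + c < 0 ∨ x + a > bXY ∨ y + b > bXY ∨ z + c > bZ) then
          neighbors ++ [(x + a, y + b, z + c)]
        else neighbors) acc
      = acc ++ (if decide (0 ≤ x + a ∧ x + a ≤ bXY) && decide (0 ≤ y + b ∧ y + b ≤ bXY) then
          ((R.filter (fun t => decide (0 ≤ z + t ∧ z + t ≤ bZ))).map (fun t => z + t)).map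
            (fun k => (x + a, y + b, k))
        else []) := by
    intro a b acc
    by_cases hab : (0 ≤ x + a ∧ x + a ≤ bXY) ∧ (0 ≤ y + b ∧ y + b ≤ bXY)
    · have hstep : (fun (neighbors : List (Int × Int × Int)) c =>
          if ¬(x + a < 0 ∨ y + b < 0 ∨ z + c < 0 ∨ x + a > bXY ∨ y + b > bXY ∨ z + c > bZ) then
            neighbors ++ [(x + a, y + b, z + c)]
          else neighbors)
        = (fun neighbors c =>
            if (fun t => decide (0 ≤ z + t ∧ z + t ≤ bZ)) c then
              neighbors ++ [(fun t => (x + a, y + b, z + t)) c]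
            else neighbors) := by
        funext acc c
        by_cases hc : 0 ≤ z + c ∧ z + c ≤ bZ
        · rw [if_pos (show ¬(x + a < 0 ∨ y + b < 0 ∨ z + c < 0 ∨ x + a > bXY ∨ y + b > bXY ∨ z + c > bZ) by omega),
              if_pos (decide_eq_true hc)]
        · rw [if_neg (show ¬¬(x + a < 0 ∨ y + b < 0 ∨ z + c < 0 ∨ x + a > bXY ∨ y + b > bXY ∨ z + c > bZ) by omega),
              if_neg (by simpa using hc)]
      rw [hstep, PySem.List.foldl_append_if, if_pos (by simp [hab.1, hab.2]), List.map_map]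
      rfl
    · have hstep : (fun (neighbors : List (Int × Int × Int)) c =>
          if ¬(x + a < 0 ∨ y + b < 0 ∨ z + c < 0 ∨ x + a > bXY ∨ y + b > bXY ∨ z + c > bZ) then
            neighbors ++ [(x + a, y + b, z + c)]
          else neighbors)
        = (fun neighbors _ => neighbors) := by
        funext acc c
        rw [if_neg (show ¬¬(x + a < 0 ∨ y + b < 0 ∨ z + c < 0 ∨ x + a > bXY ∨ y + b > bXY ∨ z + c > bZ) by omega)]
      rw [hstep, List.foldl_fixed,
          if_neg (by simp only [Bool.and_eq_true, decide_eq_true_eq]; tauto), List.append_nil]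
  have hmid : ∀ (a : Int) (acc : List (Int × Int × Int)),
      R.foldl (fun neighbors b =>
        R.foldl (fun neighbors c =>
          if ¬(x + a < 0 ∨ y + b < 0 ∨ z + c < 0 ∨ x + a > bXY ∨ y + b > bXY ∨ z + c > bZ) then
            neighbors ++ [(x + a, y + b, z + c)]
          else neighbors) neighbors) acc
      = acc ++ R.flatMap (fun b =>
          if decide (0 ≤ x + a ∧ x + a ≤ bXY) && decide (0 ≤ y + b ∧ y + b ≤ bXY) then
            ((R.filter (fun t => decide (0 ≤ z + t ∧ z + t ≤ bZ))).map (fun t => z + t)).map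
              (fun k => (x + a, y + b, k))
          else []) := by
    intro a acc
    have hstep : (fun (neighbors : List (Int × Int × Int)) b =>
        R.foldl (fun neighbors c =>
          if ¬(x + a < 0 ∨ y + b < 0 ∨ z + c < 0 ∨ x + a > bXY ∨ y + b > bXY ∨ z + c > bZ) then
            neighbors ++ [(x + a, y + b, z + c)]
          else neighbors) neighbors)
      = (fun neighbors b => neighbors ++ (fun b =>
          if decide (0 ≤ x + a ∧ x + a ≤ bXY) && decide (0 ≤ y + b ∧ y + b ≤ bXY) then
            ((R.filter (fun t => decide (0 ≤ z + t ∧ z + t ≤ bZ))).map (fun t => z + t)).map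
              (fun k => (x + a, y + b, k))
          else []) b) := by
      funext acc b; exact hin a b acc
    rw [hstep, PySem.List.foldl_append_eq_flatMap]
  have hout : (fun (neighbors : List (Int × Int × Int)) a =>
      R.foldl (fun neighbors b =>
        R.foldl (fun neighbors c =>
          if ¬(x + a < 0 ∨ y + b < 0 ∨ z + c < 0 ∨ x + a > bXY ∨ y + b > bXY ∨ z + c > bZ) then
            neighbors ++ [(x + a, y + b, z + c)]
          else neighbors) neighbors) neighbors)
    = (fun neighbors a => neighbors ++ (fun a => R.flatMap (fun b =>
          if decide (0 ≤ x + a ∧ x + a ≤ bXY) && decide (0 ≤ y + b ∧ y + b ≤ bXY) then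
            ((R.filter (fun t => decide (0 ≤ z + t ∧ z + t ≤ bZ))).map (fun t => z + t)).map
              (fun k => (x + a, y + b, k))
          else [])) a) := by
    funext acc a; exact hmid a acc
  rw [hout, PySem.List.foldl_append_eq_flatMap, List.nil_append]
  have hz := shifted_filter_range z 0 bZ d
  have hy := shifted_filter_range y 0 bXY d
  have hx := shifted_filter_range x 0 bXY d
  have hA : ∀ (a : Int),
      R.flatMap (fun b =>
        if decide (0 ≤ x + a ∧ x + a ≤ bXY) && decide (0 ≤ y + b ∧ y + b ≤ bXY) then
          ((R.filter (fun t => decide (0 ≤ z + t ∧ z + t ≤ bZ))).map (fun t => z + t)).map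
            (fun k => (x + a, y + b, k))
        else [])
      = if decide (0 ≤ x + a ∧ x + a ≤ bXY) then
          (PySem.List.pyRange (max 0 (y - d)) (min bXY (y + d) + 1) 1).flatMap (fun j =>
            (PySem.List.pyRange (max 0 (z - d)) (min bZ (z + d) + 1) 1).map (fun k => (x + a, j, k)))
        else [] := by
    intro a
    by_cases ha : 0 ≤ x + a ∧ x + a ≤ bXY
    · simp only [decide_eq_true ha, Bool.true_and]
      rw [flatMap_if_nil R (fun b => decide (0 ≤ y + b ∧ y + b ≤ bXY))
            (fun b => ((R.filter (fun t => decide (0 ≤ z + t ∧ z + t ≤ bZ))).map (fun t => z + t)).map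
              (fun k => (x + a, y + b, k))),
          hR, hz, ← hy, List.flatMap_map]
      simp
    · simp only [decide_eq_false ha, Bool.false_and, Bool.false_eq_true, if_false]
      simp
  have hfa : (fun a => R.flatMap (fun b =>
        if decide (0 ≤ x + a ∧ x + a ≤ bXY) && decide (0 ≤ y + b ∧ y + b ≤ bXY) then
          ((R.filter (fun t => decide (0 ≤ z + t ∧ z + t ≤ bZ))).map (fun t => z + t)).map
            (fun k => (x + a, y + b, k))
        else []))
      = (fun a => if decide (0 ≤ x + a ∧ x + a ≤ bXY) then
          (fun i => (PySem.List.pyRange (max 0 (y - d)) (min bXY (y + d) + 1) 1).flatMap (fun j =>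
            (PySem.List.pyRange (max 0 (z - d)) (min bZ (z + d) + 1) 1).map (fun k => (i, j, k)))) (x + a)
        else []) := by
    funext a; exact hA a
  rw [hfa, flatMap_if_nil R (fun a => decide (0 ≤ x + a ∧ x + a ≤ bXY)), hR, ← hx, List.flatMap_map]

-- A unit-step range is the image of the 0-based range of the same length.
lemma range_shift (c n : Int) :
    PySem.List.pyRange c (c + n) 1 = (PySem.List.pyRange 0 n 1).map (fun t => c + t) := by
  rw [PySem.List.pyRange_one, PySem.List.pyRange_one, List.map_map]
  have : c + n - c = n - 0 := by ring
  rw [this]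
  refine List.map_congr_left fun k _ => ?_
  simp
  try ring

-- floordiv / mod peel off a full multiple of a positive divisor.
lemma floordiv_mul_add (a r n : Int) (hn : 0 < n) :
    PySem.Int.floordiv (a * n + r) n = a + PySem.Int.floordiv r n ∧
    PySem.Int.mod (a * n + r) n = PySem.Int.mod r n := by
  have hb := (PySem.Int.floordiv_eq_iff_of_pos hn (a := r)).mp rfl
  have h1 : PySem.Int.floordiv (a * n + r) n = a + PySem.Int.floordiv r n := by
    rw [PySem.Int.floordiv_eq_iff_of_pos hn]
    constructor <;> nlinarith [hb.1, hb.2]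
  refine ⟨h1, ?_⟩
  have h2 := PySem.Int.floordiv_mul_add_mod (a * n + r) n
  have h3 := PySem.Int.floordiv_mul_add_mod r n
  rw [h1] at h2
  nlinarith [h2, h3]

-- On [0, n), floordiv is 0 and mod is the identity.
lemma floordiv_mod_small (r n : Int) (h0 : 0 ≤ r) (hr : r < n) :
    PySem.Int.floordiv r n = 0 ∧ PySem.Int.mod r n = r := by
  have hn : 0 < n := lt_of_le_of_lt h0 hr
  have h1 : PySem.Int.floordiv r n = 0 := by
    rw [PySem.Int.floordiv_eq_iff_of_pos hn]; constructor <;> nlinarith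
  have h2 := PySem.Int.floordiv_mul_add_mod r n
  rw [h1] at h2
  exact ⟨h1, by omega⟩

-- Splitting range(0, m*n) into m blocks of length n.
lemma range_block (n : Int) (hn : 0 < n) : ∀ m : Int, 0 ≤ m →
    PySem.List.pyRange 0 (m * n) 1
      = (PySem.List.pyRange 0 m 1).flatMap (fun q => (PySem.List.pyRange 0 n 1).map (fun r => q * n + r)) := by
  intro m hm
  induction m, hm using Int.le_induction with
  | base => simp [PySem.List.pyRange_one_eq_nil]
  | succ m hm2 ih =>
      have hmn : (0:Int) ≤ m * n := by positivity
      have hsplit : PySem.List.pyRange 0 ((m + 1) * n) 1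
          = PySem.List.pyRange 0 (m * n) 1 ++ PySem.List.pyRange (m * n) ((m + 1) * n) 1 :=
        PySem.List.pyRange_one_append _ _ _ hmn (by nlinarith)
      rw [hsplit, ih, PySem.List.pyRange_one_succ_right hm2, List.flatMap_append]
      congr 1
      have : (m + 1) * n = m * n + n := by ring
      rw [this, range_shift (m * n) n]
      simp [List.flatMap_cons]

-- The linear-index decode of range(0, nx*ny*nz) is the Cartesian product of the three shifted ranges.
lemma decode_range (x0 y0 z0 nx ny nz : Int) (hx : 0 < nx) (hy : 0 < ny) (hz : 0 < nz) :
    (PySem.List.pyRange 0 (nx * ny * nz) 1).map (fun t =>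
        (x0 + PySem.Int.floordiv t (ny * nz),
         y0 + PySem.Int.mod (PySem.Int.floordiv t nz) ny,
         z0 + PySem.Int.mod t nz))
      = (PySem.List.pyRange x0 (x0 + nx) 1).flatMap (fun i =>
          (PySem.List.pyRange y0 (y0 + ny) 1).flatMap (fun j =>
            (PySem.List.pyRange z0 (z0 + nz) 1).map (fun k => (i, j, k)))) := by
  have hyz : (0:Int) < ny * nz := by positivity
  rw [show nx * ny * nz = nx * (ny * nz) by ring,
      range_block (ny * nz) hyz nx (le_of_lt hx), List.map_flatMap]
  rw [range_shift x0 nx, List.flatMap_map, range_shift y0 ny, range_shift z0 nz]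
  refine List.flatMap_congr fun q hq => ?_
  rw [List.map_map]
  -- decode each element of the q-th block
  have hblock : ∀ r ∈ PySem.List.pyRange 0 (ny * nz) 1,
      ((fun t => (x0 + PySem.Int.floordiv t (ny * nz),
         y0 + PySem.Int.mod (PySem.Int.floordiv t nz) ny,
         z0 + PySem.Int.mod t nz)) ∘ (fun r => q * (ny * nz) + r)) r
      = (x0 + q, y0 + PySem.Int.floordiv r nz, z0 + PySem.Int.mod r nz) := by
    intro r hr
    rw [PySem.List.mem_pyRange_one] at hr
    have hsm := floordiv_mod_small r (ny * nz) hr.1 hr.2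
    have hs0 : 0 ≤ PySem.Int.floordiv r nz := by
      rw [PySem.Int.le_floordiv_iff_mul_le hz]; simpa using hr.1
    have hs1 : PySem.Int.floordiv r nz < ny := by
      rw [PySem.Int.floordiv_lt_iff_lt_mul hz]; exact hr.2
    have h4 := floordiv_mod_small (PySem.Int.floordiv r nz) ny hs0 hs1
    have E1 : PySem.Int.floordiv (q * (ny * nz) + r) (ny * nz) = q := by
      rw [(floordiv_mul_add q r (ny * nz) hyz).1, hsm.1, add_zero]
    have E2 : PySem.Int.floordiv (q * (ny * nz) + r) nz = q * ny + PySem.Int.floordiv r nz := by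
      rw [show q * (ny * nz) + r = (q * ny) * nz + r by ring]
      exact (floordiv_mul_add (q * ny) r nz hz).1
    have E3 : PySem.Int.mod (q * (ny * nz) + r) nz = PySem.Int.mod r nz := by
      rw [show q * (ny * nz) + r = (q * ny) * nz + r by ring]
      exact (floordiv_mul_add (q * ny) r nz hz).2
    have E4 : PySem.Int.mod (q * ny + PySem.Int.floordiv r nz) ny = PySem.Int.floordiv r nz := by
      rw [(floordiv_mul_add q (PySem.Int.floordiv r nz) ny hy).2, h4.2]
    simp only [Function.comp]
    rw [E1, E2, E3, E4]
  rw [List.map_congr_left hblock]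
  -- now split the block index r = j*nz + k
  rw [range_block nz hz ny (le_of_lt hy), List.map_flatMap, List.flatMap_map]
  refine List.flatMap_congr fun j hj => ?_
  rw [PySem.List.mem_pyRange_one] at hj
  rw [List.map_map, List.map_map]
  apply List.map_congr_left
  intro k hk
  rw [PySem.List.mem_pyRange_one] at hk
  have h5 := floordiv_mul_add j k nz hz
  have h6 := floordiv_mod_small k nz hk.1 hk.2
  simp only [Function.comp]
  rw [h5.1, h5.2, h6.1, h6.2]
  ring_nf

-- ===== VERDICT (by name: the statement is the Claim_ definition above) =====
theorem returnNeighbors_spec : Claim_equal_returnNeighbors := by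
  intro x y z bXY bZ d _
  unfold Spec_returnNeighbors
  rw [A_eq_flatMap]
  show _ = returnNeighbors_alt x y z bXY bZ d
  unfold returnNeighbors_alt
  simp only []
  set x0 := max 0 (x - d) with hx0
  set y0 := max 0 (y - d) with hy0
  set z0 := max 0 (z - d) with hz0
  set nx := min bXY (x + d) - x0 + 1 with hnx
  set ny := min bXY (y + d) - y0 + 1 with hny
  set nz := min bZ (z + d) - z0 + 1 with hnz
  have ex : min bXY (x + d) + 1 = x0 + nx := by omega
  have ey : min bXY (y + d) + 1 = y0 + ny := by omega
  have ez : min bZ (z + d) + 1 = z0 + nz := by omega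
  rw [ex, ey, ez]
  by_cases hg : nx ≤ 0 ∨ ny ≤ 0 ∨ nz ≤ 0
  · rw [if_pos hg]
    rcases hg with h | h | h
    · rw [PySem.List.pyRange_one_eq_nil (show x0 + nx ≤ x0 by omega)]; simp
    · rw [PySem.List.pyRange_one_eq_nil (show y0 + ny ≤ y0 by omega)]; simp
    · rw [PySem.List.pyRange_one_eq_nil (show z0 + nz ≤ z0 by omega)]; simp
  · rw [if_neg hg]
    rw [PySem.List.foldl_append_singleton_eq_map, List.nil_append,
        decode_range x0 y0 z0 nx ny nz (by omega) (by omega) (by omega)]
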